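-- pv_equiv track=rewrite | github.com/sranyjstrannik/codeforces | codeforces389/c.py | f
-- ===== SOURCE A (Python) =====
-- def f(way):
--     if len(way) == 1:
--         return 1
--     if len(way) == 0:
--         return 0
--     current = way[0]
--     next = way[1]
--     way = way[2:]
--     while current == next:
--         if len(way):
--             current = next
--             next = way[0]
--             way = way[1:]
--         else: return 1
--     # дошли до поворота
--     total = 0
--     if ((current == 'R' and next == 'L') or
--             (current == 'L' and next == 'R')): total += 1
--     # идем до конца
--     current = next
--     next = way[0]
--     way = way[1:]
--     while current == next:
--         if len(way):
--             current = next
--             next = way[0]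
--             way = way[1:]
--         else: return 1+total
--     # дошли до поворота
--     if ((current == 'R' and next == 'L') or
--             (current == 'L' and next == 'R')): return 1+total+f(way)
--     return total+f(way[1:])
-- ===== SOURCE B (Python) =====
-- def f(way):
--     n = len(way)
--     if n == 0:
--         return 0
--     total = 0
--     p = 0
--     while n - p >= 2:
--         # first position i >= p where the adjacent pair changes
--         i = p
--         while i < n - 1 and way[i] == way[i + 1]:
--             i += 1
--         if i == n - 1:                      # no change up to the end
--             return total + 1
--         t1 = 1 if way[i] + way[i + 1] in ('RL', 'LR') else 0
--         # next change strictly after i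
--         j = i + 1
--         while j < n - 1 and way[j] == way[j + 1]:
--             j += 1
--         if j == n - 1:                      # ran to the end
--             return total + t1 + 1
--         total += t1
--         if way[j] + way[j + 1] in ('RL', 'LR'):
--             total += 1
--             p = j + 2
--         else:
--             p = j + 3
--     return total + max(n - p, 0)
-- ===== Notes on version B (the rewrite author's own statement) =====
-- stated objective: faster
-- what changed: B replaces A's recursive slice-and-rescan (each step copies the remaining string with way[1:]/way[2:] and recurses) by a single iterative left-to-right index-pointer scan that keeps a running total, copying nothing and recursing never.
import Mathlib
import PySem

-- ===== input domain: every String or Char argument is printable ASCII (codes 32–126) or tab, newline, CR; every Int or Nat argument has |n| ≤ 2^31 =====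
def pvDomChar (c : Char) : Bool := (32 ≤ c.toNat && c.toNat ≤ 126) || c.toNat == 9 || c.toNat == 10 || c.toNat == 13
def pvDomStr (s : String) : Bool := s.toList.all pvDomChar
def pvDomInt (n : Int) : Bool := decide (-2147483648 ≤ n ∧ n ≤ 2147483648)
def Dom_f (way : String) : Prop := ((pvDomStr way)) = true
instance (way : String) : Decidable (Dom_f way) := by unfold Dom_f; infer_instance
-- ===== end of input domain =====

-- B replaces A's slice-and-recurse scan by one index-pointer pass over the string (no slicing, no recursion);
-- a timing run measures whether that is faster. Equality is proved on Pre_f (exactly the inputs where A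
-- does not raise IndexError).

-- ===== PORT A =====
-- A's two identical `while current == next:` loops, each consuming the local `way` one char at a time;
-- `none` = the loop ran to the end of the string and the function returned there.
def whileEqA (current next : Char) (way : List Char) : Option (Char × Char × List Char) :=
  if current = next then
    match way with
    | [] => none
    | w0 :: rest => whileEqA next w0 rest
  else some (current, next, way)

-- needed for fCore's termination: the loop only consumes the list
theorem whileEqA_length : ∀ (c d : Char) (w : List Char) (c' d' : Char) (w' : List Char),
    whileEqA c d w = some (c', d', w') → w'.length ≤ w.length := by
  intro c d w
  induction w generalizing c d with
  | nil =>
    intro c' d' w' h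
    rw [whileEqA] at h
    by_cases hcd : c = d <;> simp [hcd] at h
    simp [h]
  | cons w0 rest ih =>
    intro c' d' w' h
    rw [whileEqA] at h
    by_cases hcd : c = d
    · simp only [hcd, if_pos rfl] at h
      have := ih d w0 c' d' w' h
      simpa using Nat.le_succ_of_le this
    · simp [hcd] at h
      simp [h]

mutual
-- straight transliteration of A's body (len checks, first loop, turn test, second loop, recursion);
-- the `0` in the `[]` branch is where Python raises IndexError (excluded by Pre_f).
def fCore (l : List Char) : Int :=
  if l.length = 1 then 1
  else if l.length = 0 then 0
  else
    match l with
    | current :: next :: way =>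
      match h : whileEqA current next way with
      | none => 1
      | some (c1, n1, w1) =>
        let total : Int := if (c1 = 'R' ∧ n1 = 'L') ∨ (c1 = 'L' ∧ n1 = 'R') then 1 else 0
        match hw : w1 with
        | [] => 0
        | w0 :: w2 => fCoreSecond total n1 w0 w2
    | _ => 0
termination_by l.length
decreasing_by
  have h1 := whileEqA_length _ _ _ _ _ _ h
  simp_all
  omega
-- the part of A's body after `current = next; next = way[0]; way = way[1:]`
def fCoreSecond (total : Int) (current next : Char) (way : List Char) : Int :=
  match h : whileEqA current next way with
  | none => 1 + total
  | some (c2, n2, w3) =>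
    if (c2 = 'R' ∧ n2 = 'L') ∨ (c2 = 'L' ∧ n2 = 'R') then 1 + total + fCore w3
    else total + fCore (w3.drop 1)
termination_by way.length + 1
decreasing_by
  · have := whileEqA_length _ _ _ _ _ _ h
    omega
  · have h1 := whileEqA_length _ _ _ _ _ _ h
    have h2 : (w3.drop 1).length ≤ w3.length := by simp
    omega
end

def f (way : String) : Int := fCore way.toList

-- ===== PORT B =====
-- Source B's inner `while i < n - 1 and way[i] == way[i+1]: i += 1`
def findChgB (l : List Char) (i : Nat) : Nat :=
  if h : i + 1 < l.length ∧ l.getD i ' ' = l.getD (i + 1) ' ' then findChgB l (i + 1) else i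
termination_by l.length - i
decreasing_by omega

-- needed for goB's termination: the scan pointer never moves left
theorem findChgB_ge_aux : ∀ (k i : Nat) (l : List Char), l.length - i ≤ k → i ≤ findChgB l i := by
  intro k
  induction k with
  | zero =>
    intro i l hk
    rw [findChgB]
    split
    · next h => omega
    · omega
  | succ k ih =>
    intro i l hk
    rw [findChgB]
    split
    · next h =>
      have := ih (i + 1) l (by omega)
      omega
    · omega

theorem findChgB_ge (l : List Char) (i : Nat) : i ≤ findChgB l i :=
  findChgB_ge_aux l.length i l (by omega)

-- Source B's outer `while n - p >= 2:` loop; `total` and `p` are its two mutable variables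
def goB (l : List Char) (total : Int) (p : Nat) : Int :=
  if p + 2 ≤ l.length then
    let i := findChgB l p
    if i = l.length - 1 then total + 1
    else
      let t1 : Int := if (l.getD i ' ' = 'R' ∧ l.getD (i + 1) ' ' = 'L') ∨
                         (l.getD i ' ' = 'L' ∧ l.getD (i + 1) ' ' = 'R') then 1 else 0
      let j := findChgB l (i + 1)
      if j = l.length - 1 then total + t1 + 1
      else if (l.getD j ' ' = 'R' ∧ l.getD (j + 1) ' ' = 'L') ∨
              (l.getD j ' ' = 'L' ∧ l.getD (j + 1) ' ' = 'R') then goB l (total + t1 + 1) (j + 2)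
      else goB l (total + t1) (j + 3)
  else total + max ((l.length : Int) - (p : Int)) 0
termination_by l.length - p
decreasing_by
  · have h1 := findChgB_ge l p
    have h2 := findChgB_ge l (findChgB l p + 1)
    omega
  · have h1 := findChgB_ge l p
    have h2 := findChgB_ge l (findChgB l p + 1)
    omega

def f_alt (way : String) : Int :=
  if way.toList.length = 0 then 0 else goB way.toList 0 0

-- ===== PRECONDITION & SPEC =====
-- Pre_f excludes exactly the strings on which A raises IndexError (`next = way[0]` on the emptied string):
-- those whose left-to-right block decomposition ends in a run followed by a single differing character.
-- raisesShape false l = true ↔ Python A raises on l (phase `true` = past the first direction change).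
def raisesShape : Bool → List Char → Bool
  | _, [] => false
  | _, [_] => false
  | false, x :: y :: r =>
    if x = y then raisesShape false (y :: r)
    else
      match r with
      | [] => true
      | _ :: _ => raisesShape true (y :: r)
  | true, u :: v :: t =>
    if u = v then raisesShape true (v :: t)
    else if (u = 'R' ∧ v = 'L') ∨ (u = 'L' ∧ v = 'R') then raisesShape false t
    else
      match t with
      | [] => false
      | _ :: t' => raisesShape false t'

def Pre_f (way : String) : Prop := raisesShape false way.toList = false
instance (way : String) : Decidable (Pre_f way) := by unfold Pre_f; infer_instance

def pvWitness_f : String := "RLL"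

def Spec_f (way : String) (out : Int) : Prop := out = f_alt way
instance (way : String) (out : Int) : Decidable (Spec_f way out) := by unfold Spec_f; infer_instance

-- ===== CLAIM (what is proved, stated in full; the proofs are below) =====
def Claim_equal_f : Prop := ∀ (way : String), Dom_f way → Pre_f way → Spec_f way (f way)

-- ===== LEMMAS AND PROOFS =====
theorem whileEqA_ne {c d : Char} (w : List Char) (h : c ≠ d) : whileEqA c d w = some (c, d, w) := by
  rw [whileEqA.eq_def]; simp [h]
theorem whileEqA_step {c d : Char} (w0 : Char) (rest : List Char) (h : c = d) :
    whileEqA c d (w0 :: rest) = whileEqA d w0 rest := by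
  rw [whileEqA.eq_def]; simp [h]
theorem whileEqA_nil {c d : Char} (h : c = d) : whileEqA c d [] = none := by
  rw [whileEqA.eq_def]; simp [h]

theorem fCore_nil : fCore [] = 0 := by rw [fCore.eq_def]; rfl

theorem fCore_single (x : Char) : fCore [x] = 1 := by rw [fCore.eq_def]; rfl


theorem fCore_eval_none {x y : Char} {r : List Char} (h : whileEqA x y r = none) :
    fCore (x :: y :: r) = 1 := by
  rw [fCore.eq_def]
  norm_num
  split <;> rename_i hL <;> rw [h] at hL <;> cases hL <;> rfl

theorem fCore_eval_some_nil {x y c d : Char} {r : List Char} (h : whileEqA x y r = some (c, d, [])) :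
    fCore (x :: y :: r) = 0 := by
  rw [fCore.eq_def]
  norm_num
  split <;> rename_i hL <;> rw [h] at hL <;> cases hL <;> rfl

theorem fCore_eval_some_cons {x y c d w0 : Char} {r w2 : List Char}
    (h : whileEqA x y r = some (c, d, w0 :: w2)) :
    fCore (x :: y :: r) = fCoreSecond (if (c = 'R' ∧ d = 'L') ∨ (c = 'L' ∧ d = 'R') then 1 else 0) d w0 w2 := by
  rw [fCore.eq_def]
  norm_num
  split <;> rename_i hL <;> rw [h] at hL <;> cases hL <;> rfl

theorem fCoreSecond_eval_none {u v : Char} {t : List Char} (total : Int)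
    (h : whileEqA u v t = none) : fCoreSecond total u v t = 1 + total := by
  rw [fCoreSecond.eq_def]
  split <;> rename_i hL <;> rw [h] at hL <;> cases hL <;> rfl

theorem fCoreSecond_eval_some {u v c d : Char} {t w3 : List Char} (total : Int)
    (h : whileEqA u v t = some (c, d, w3)) :
    fCoreSecond total u v t =
      if (c = 'R' ∧ d = 'L') ∨ (c = 'L' ∧ d = 'R') then 1 + total + fCore w3
      else total + fCore (w3.drop 1) := by
  rw [fCoreSecond.eq_def]
  split <;> rename_i hL <;> rw [h] at hL <;> cases hL <;> rfl
theorem fCore_skip {x y : Char} (r : List Char) (h : x = y) : fCore (x :: y :: r) = fCore (y :: r) := by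
  subst h
  match r with
  | [] => rw [fCore_eval_none (whileEqA_nil rfl), fCore_single]
  | r0 :: r' =>
    have hstep : whileEqA x x (r0 :: r') = whileEqA x r0 r' := whileEqA_step _ _ rfl
    rcases hE : whileEqA x r0 r' with _ | ⟨c, d, w⟩
    · rw [fCore_eval_none (hstep.trans hE), fCore_eval_none hE]
    · match w with
      | [] => rw [fCore_eval_some_nil (hstep.trans hE), fCore_eval_some_nil hE]
      | w0 :: w2 => rw [fCore_eval_some_cons (hstep.trans hE), fCore_eval_some_cons hE]

theorem fCore_change {x y w0 : Char} (w2 : List Char) (h : x ≠ y) :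
    fCore (x :: y :: w0 :: w2) =
      fCoreSecond (if (x = 'R' ∧ y = 'L') ∨ (x = 'L' ∧ y = 'R') then 1 else 0) y w0 w2 :=
  fCore_eval_some_cons (whileEqA_ne _ h)

theorem fCoreSecond_nil {u v : Char} (total : Int) (h : u = v) : fCoreSecond total u v [] = 1 + total :=
  fCoreSecond_eval_none total (whileEqA_nil h)

theorem fCoreSecond_skip {u v : Char} (total : Int) (t0 : Char) (t' : List Char) (h : u = v) :
    fCoreSecond total u v (t0 :: t') = fCoreSecond total v t0 t' := by
  have hstep : whileEqA u v (t0 :: t') = whileEqA v t0 t' := whileEqA_step _ _ h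
  rcases hE : whileEqA v t0 t' with _ | ⟨c, d, w⟩
  · rw [fCoreSecond_eval_none total (hstep.trans hE), fCoreSecond_eval_none total hE]
  · rw [fCoreSecond_eval_some total (hstep.trans hE), fCoreSecond_eval_some total hE]

theorem fCoreSecond_change {u v : Char} (total : Int) (t : List Char) (h : u ≠ v) :
    fCoreSecond total u v t =
      if (u = 'R' ∧ v = 'L') ∨ (u = 'L' ∧ v = 'R') then 1 + total + fCore t
      else total + fCore (t.drop 1) :=
  fCoreSecond_eval_some total (whileEqA_ne t h)


-- unfolding lemmas for raisesShape (its equation lemmas need the branch conditions supplied)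
theorem raises_f_skip {x y : Char} (r : List Char) (h : x = y) :
    raisesShape false (x :: y :: r) = raisesShape false (y :: r) := by
  rw [raisesShape.eq_def]; simp [h]
theorem raises_f_change_nil {x y : Char} (h : x ≠ y) : raisesShape false [x, y] = true := by
  rw [raisesShape.eq_def]; simp [h]
theorem raises_f_change {x y z : Char} (r' : List Char) (h : x ≠ y) :
    raisesShape false (x :: y :: z :: r') = raisesShape true (y :: z :: r') := by
  rw [raisesShape.eq_def]; simp [h]
theorem raises_t_skip {u v : Char} (t : List Char) (h : u = v) :
    raisesShape true (u :: v :: t) = raisesShape true (v :: t) := by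
  rw [raisesShape.eq_def]; simp [h]
theorem raises_t_turn {u v : Char} (t : List Char) (h : u ≠ v)
    (ht : (u = 'R' ∧ v = 'L') ∨ (u = 'L' ∧ v = 'R')) :
    raisesShape true (u :: v :: t) = raisesShape false t := by
  rw [raisesShape.eq_def]; simp [h, ht]
theorem raises_t_nonturn {u v : Char} (t : List Char) (h : u ≠ v)
    (ht : ¬((u = 'R' ∧ v = 'L') ∨ (u = 'L' ∧ v = 'R'))) :
    raisesShape true (u :: v :: t) = raisesShape false (t.drop 1) := by
  rw [raisesShape.eq_def]; simp [h, ht]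
  match t with
  | [] => rfl
  | z :: t' => rfl
def fStep : Bool → Int → List Char → Int
  | false, _, [] => 0
  | false, _, [_] => 1
  | false, _, x :: y :: r =>
    if x = y then fStep false 0 (y :: r)
    else
      match r with
      | [] => 0
      | z :: r' => fStep true (if (x = 'R' ∧ y = 'L') ∨ (x = 'L' ∧ y = 'R') then 1 else 0) (y :: z :: r')
  | true, total, [] => 1 + total
  | true, total, [_] => 1 + total
  | true, total, u :: v :: t =>
    if u = v then fStep true total (v :: t)
    else if (u = 'R' ∧ v = 'L') ∨ (u = 'L' ∧ v = 'R') then 1 + total + fStep false 0 t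
    else total + fStep false 0 (t.drop 1)
termination_by _ _ l => l.length
decreasing_by all_goals (simp; try omega)

-- fStep unfold lemmas
theorem fStep_f_nil (a : Int) : fStep false a [] = 0 := by rw [fStep.eq_def]
theorem fStep_f_one (a : Int) (x : Char) : fStep false a [x] = 1 := by rw [fStep.eq_def]
theorem fStep_f_skip {x y : Char} (a : Int) (r : List Char) (h : x = y) :
    fStep false a (x :: y :: r) = fStep false 0 (y :: r) := by
  rw [fStep.eq_def]; simp [h]
theorem fStep_f_change {x y z : Char} (a : Int) (r' : List Char) (h : x ≠ y) :
    fStep false a (x :: y :: z :: r') =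
      fStep true (if (x = 'R' ∧ y = 'L') ∨ (x = 'L' ∧ y = 'R') then 1 else 0) (y :: z :: r') := by
  rw [fStep.eq_def]; simp [h]
theorem fStep_t_nil (total : Int) : fStep true total [] = 1 + total := by rw [fStep.eq_def]
theorem fStep_t_one (total : Int) (u : Char) : fStep true total [u] = 1 + total := by rw [fStep.eq_def]
theorem fStep_t_skip {u v : Char} (total : Int) (t : List Char) (h : u = v) :
    fStep true total (u :: v :: t) = fStep true total (v :: t) := by
  rw [fStep.eq_def]; simp [h]
theorem fStep_t_turn {u v : Char} (total : Int) (t : List Char) (h : u ≠ v)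
    (ht : (u = 'R' ∧ v = 'L') ∨ (u = 'L' ∧ v = 'R')) :
    fStep true total (u :: v :: t) = 1 + total + fStep false 0 t := by
  rw [fStep.eq_def]; simp [h, ht]
theorem fStep_t_nonturn {u v : Char} (total : Int) (t : List Char) (h : u ≠ v)
    (ht : ¬((u = 'R' ∧ v = 'L') ∨ (u = 'L' ∧ v = 'R'))) :
    fStep true total (u :: v :: t) = total + fStep false 0 (t.drop 1) := by
  rw [fStep.eq_def]; simp [h, ht]

theorem fStep_shift (m : List Char) : ∀ (a b : Int), fStep true (a + b) m = a + fStep true b m := by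
  induction m with
  | nil => intro a b; rw [fStep_t_nil, fStep_t_nil]; ring
  | cons u tail ih =>
    intro a b
    match tail with
    | [] => rw [fStep_t_one, fStep_t_one]; ring
    | v :: t =>
      by_cases huv : u = v
      · rw [fStep_t_skip _ _ huv, fStep_t_skip _ _ huv]
        exact ih a b
      · by_cases ht : (u = 'R' ∧ v = 'L') ∨ (u = 'L' ∧ v = 'R')
        · rw [fStep_t_turn _ _ huv ht, fStep_t_turn _ _ huv ht]; ring
        · rw [fStep_t_nonturn _ _ huv ht, fStep_t_nonturn _ _ huv ht]; ring

theorem stage1 : ∀ N : Nat,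
    (∀ l : List Char, l.length ≤ N → raisesShape false l = false → fCore l = fStep false 0 l) ∧
    (∀ (total : Int) (u v : Char) (t : List Char), (u :: v :: t).length ≤ N →
      raisesShape true (u :: v :: t) = false → fCoreSecond total u v t = fStep true total (u :: v :: t)) := by
  intro N
  induction N with
  | zero =>
    constructor
    · intro l hl _
      have : l = [] := List.length_eq_zero_iff.mp (Nat.le_zero.mp hl)
      subst this
      rw [fCore_nil, fStep_f_nil]
    · intro total u v t hl
      simp at hl
  | succ N ih =>
    obtain ⟨ihP, ihQ⟩ := ih
    constructor
    · intro l hl hr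
      match l with
      | [] => rw [fCore_nil, fStep_f_nil]
      | [x] => rw [fCore_single, fStep_f_one]
      | x :: y :: r =>
        by_cases hxy : x = y
        · rw [fCore_skip r hxy, fStep_f_skip _ _ hxy]
          exact ihP (y :: r) (by simp at hl ⊢; omega) (by rw [raises_f_skip r hxy] at hr; exact hr)
        · match r with
          | [] => rw [raises_f_change_nil hxy] at hr; cases hr
          | w0 :: w2 =>
            rw [fCore_change w2 hxy, fStep_f_change _ _ hxy]
            exact ihQ _ y w0 w2 (by simp at hl ⊢; omega)
              (by rw [raises_f_change w2 hxy] at hr; exact hr)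
    · intro total u v t hl hr
      by_cases huv : u = v
      · match t with
        | [] =>
          rw [fCoreSecond_nil total huv, fStep_t_skip _ _ huv, fStep_t_one]
        | t0 :: t' =>
          rw [fCoreSecond_skip total t0 t' huv, fStep_t_skip _ _ huv]
          exact ihQ total v t0 t' (by simp at hl ⊢; omega)
            (by rw [raises_t_skip _ huv] at hr; exact hr)
      · rw [fCoreSecond_change total t huv]
        by_cases ht : (u = 'R' ∧ v = 'L') ∨ (u = 'L' ∧ v = 'R')
        · rw [if_pos ht, fStep_t_turn _ _ huv ht]
          rw [ihP t (by simp at hl ⊢; omega) (by rw [raises_t_turn _ huv ht] at hr; exact hr)]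
        · rw [if_neg ht, fStep_t_nonturn _ _ huv ht]
          rw [ihP (t.drop 1) (by simp at hl; simp only [List.length_drop]; omega)
            (by rw [raises_t_nonturn _ huv ht] at hr; exact hr)]

-- ===== PORT B =====
-- Source B's inner `while i < n - 1 and way[i] == way[i+1]: i += 1`
-- unfolding lemmas for B's scan
theorem findChg_rec {l : List Char} {p : Nat} (h1 : p + 1 < l.length)
    (h2 : l.getD p ' ' = l.getD (p + 1) ' ') : findChgB l p = findChgB l (p + 1) := by
  rw [findChgB]; rw [dif_pos ⟨h1, h2⟩]

theorem findChg_stop {l : List Char} {p : Nat}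
    (h : ¬(p + 1 < l.length ∧ l.getD p ' ' = l.getD (p + 1) ' ')) : findChgB l p = p := by
  rw [findChgB]; simp only [dif_neg h]

theorem goB_low {l : List Char} {p : Nat} (total : Int) (h : ¬(p + 2 ≤ l.length)) :
    goB l total p = total + max ((l.length : Int) - (p : Int)) 0 := by
  rw [goB]; simp [h]

theorem drop_getD_cons {l : List Char} {p : Nat} (h : p < l.length) :
    l.drop p = l.getD p ' ' :: l.drop (p + 1) := by
  rw [List.getD_eq_getElem l ' ' h, List.drop_eq_getElem_cons h]

theorem goB_skip {l : List Char} {p : Nat} (total : Int) (h1 : p + 2 ≤ l.length)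
    (h2 : l.getD p ' ' = l.getD (p + 1) ' ') : goB l total p = goB l total (p + 1) := by
  have hf : findChgB l p = findChgB l (p + 1) := findChg_rec (by omega) h2
  by_cases h3 : p + 3 ≤ l.length
  · rw [goB, goB]
    simp only [if_pos h1, if_pos h3, hf]
  · have hlen : l.length = p + 2 := by omega
    have hstop : findChgB l (p + 1) = p + 1 := findChg_stop (by omega)
    rw [goB, goB]
    simp only [if_pos h1, if_neg h3, hf, hstop]
    rw [if_pos (by omega)]
    have hmax : max ((l.length : Int) - (↑(p + 1) : Int)) 0 = 1 := by
      have : (l.length : Int) - (↑(p + 1) : Int) = 1 := by omega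
      rw [this]; norm_num
    rw [hmax]

-- the part of Source B's loop body after the first inner scan found a change at i < n-1
-- (called with q = i+1 and the accumulator already holding total + t1)
def body2 (l : List Char) (total : Int) (q : Nat) : Int :=
  let j := findChgB l q
  if j = l.length - 1 then total + 1
  else if (l.getD j ' ' = 'R' ∧ l.getD (j + 1) ' ' = 'L') ∨
          (l.getD j ' ' = 'L' ∧ l.getD (j + 1) ' ' = 'R') then goB l (total + 1) (j + 2)
  else goB l total (j + 3)

theorem goB_change {l : List Char} {p : Nat} (total : Int) (h1 : p + 2 ≤ l.length)
    (h2 : l.getD p ' ' ≠ l.getD (p + 1) ' ') :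
    goB l total p = body2 l (total + (if (l.getD p ' ' = 'R' ∧ l.getD (p + 1) ' ' = 'L') ∨
      (l.getD p ' ' = 'L' ∧ l.getD (p + 1) ' ' = 'R') then 1 else 0)) (p + 1) := by
  have hstop : findChgB l p = p := findChg_stop (fun hc => h2 hc.2)
  rw [goB]
  unfold body2
  simp only [if_pos h1, hstop]
  rw [if_neg (show ¬(p = l.length - 1) by omega)]

theorem body2_skip {l : List Char} {q : Nat} (total : Int) (h1 : q + 1 < l.length)
    (h2 : l.getD q ' ' = l.getD (q + 1) ' ') : body2 l total q = body2 l total (q + 1) := by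
  unfold body2
  rw [findChg_rec h1 h2]

theorem stage2 (l : List Char) : ∀ N : Nat,
    (∀ (total : Int) (p : Nat), l.length - p ≤ N → raisesShape false (l.drop p) = false →
        goB l total p = total + fStep false 0 (l.drop p)) ∧
    (∀ (total : Int) (q : Nat), l.length - q ≤ N → q < l.length → raisesShape true (l.drop q) = false →
        body2 l total q = fStep true total (l.drop q)) := by
  intro N
  induction N with
  | zero =>
    constructor
    · intro total p hN _
      have hdrop : l.drop p = [] := List.drop_eq_nil_of_le (by omega)
      rw [goB_low total (by omega), hdrop, fStep_f_nil]
      have : max ((l.length : Int) - (p : Int)) 0 = 0 := max_eq_right (by omega)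
      rw [this]
    · intro total q hN hq
      omega
  | succ N ih =>
    obtain ⟨ihG, ihH⟩ := ih
    constructor
    · intro total p hN hr
      by_cases hp : p + 2 ≤ l.length
      · have hd : l.drop p = l.getD p ' ' :: l.drop (p + 1) := drop_getD_cons (by omega)
        have hd1 : l.drop (p + 1) = l.getD (p + 1) ' ' :: l.drop (p + 2) := drop_getD_cons (by omega)
        by_cases hab : l.getD p ' ' = l.getD (p + 1) ' '
        · rw [goB_skip total hp hab]
          rw [hd, hd1] at hr
          rw [raises_f_skip _ hab, ← hd1] at hr
          rw [ihG total (p + 1) (by omega) hr]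
          rw [hd, hd1, fStep_f_skip _ _ hab, ← hd1]
        · by_cases hp3 : p + 2 < l.length
          · have hd2 : l.drop (p + 2) = l.getD (p + 2) ' ' :: l.drop (p + 3) := drop_getD_cons (by omega)
            rw [goB_change total hp hab]
            rw [hd, hd1, hd2] at hr
            rw [raises_f_change _ hab, ← hd2, ← hd1] at hr
            rw [ihH _ (p + 1) (by omega) (by omega) hr]
            rw [hd, hd1, hd2, fStep_f_change _ _ hab, ← hd2, ← hd1]
            rw [show (total + (if (l.getD p ' ' = 'R' ∧ l.getD (p + 1) ' ' = 'L') ∨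
              (l.getD p ' ' = 'L' ∧ l.getD (p + 1) ' ' = 'R') then 1 else 0)) =
              total + (if (l.getD p ' ' = 'R' ∧ l.getD (p + 1) ' ' = 'L') ∨
              (l.getD p ' ' = 'L' ∧ l.getD (p + 1) ' ' = 'R') then (1:Int) else 0) from rfl]
            rw [fStep_shift]
          · have hlen : l.length = p + 2 := by omega
            have hnil : l.drop (p + 2) = [] := List.drop_eq_nil_of_le (by omega)
            rw [hd, hd1, hnil] at hr
            rw [raises_f_change_nil hab] at hr
            cases hr
      · rw [goB_low total hp]
        by_cases hp0 : p < l.length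
        · have hd : l.drop p = l.getD p ' ' :: l.drop (p + 1) := drop_getD_cons hp0
          have hnil : l.drop (p + 1) = [] := List.drop_eq_nil_of_le (by omega)
          rw [hd, hnil, fStep_f_one]
          have : max ((l.length : Int) - (p : Int)) 0 = 1 := by
            have : (l.length : Int) - (p : Int) = 1 := by omega
            rw [this]; norm_num
          rw [this]
        · have hdrop : l.drop p = [] := List.drop_eq_nil_of_le (by omega)
          rw [hdrop, fStep_f_nil]
          have : max ((l.length : Int) - (p : Int)) 0 = 0 := max_eq_right (by omega)
          rw [this]
    · intro total q hN hq hr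
      have hd : l.drop q = l.getD q ' ' :: l.drop (q + 1) := drop_getD_cons hq
      by_cases hq1 : q + 1 < l.length
      · have hd1 : l.drop (q + 1) = l.getD (q + 1) ' ' :: l.drop (q + 2) := drop_getD_cons hq1
        by_cases huv : l.getD q ' ' = l.getD (q + 1) ' '
        · rw [body2_skip total hq1 huv]
          rw [hd, hd1] at hr
          rw [raises_t_skip _ huv, ← hd1] at hr
          rw [ihH total (q + 1) (by omega) hq1 hr]
          rw [hd, hd1, fStep_t_skip _ _ huv, ← hd1]
        · have hstop : findChgB l q = q := findChg_stop (fun hc => huv hc.2)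
          unfold body2
          simp only [hstop]
          rw [if_neg (show ¬(q = l.length - 1) by omega)]
          rw [hd, hd1] at hr ⊢
          by_cases ht : (l.getD q ' ' = 'R' ∧ l.getD (q + 1) ' ' = 'L') ∨
              (l.getD q ' ' = 'L' ∧ l.getD (q + 1) ' ' = 'R')
          · rw [if_pos ht]
            rw [raises_t_turn _ huv ht] at hr
            rw [ihG (total + 1) (q + 2) (by omega) hr]
            rw [fStep_t_turn _ _ huv ht]
            ring
          · rw [if_neg ht]
            rw [raises_t_nonturn _ huv ht, List.drop_drop] at hr
            rw [show q + 2 + 1 = q + 3 from by omega] at hr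
            rw [ihG total (q + 3) (by omega) hr]
            rw [fStep_t_nonturn _ _ huv ht, List.drop_drop]
      · have hstop : findChgB l q = q := findChg_stop (by omega)
        unfold body2
        simp only [hstop]
        rw [if_pos (show q = l.length - 1 by omega)]
        have hnil : l.drop (q + 1) = [] := List.drop_eq_nil_of_le (by omega)
        rw [hd, hnil, fStep_t_one]
        omega

theorem main_list (l : List Char) (hr : raisesShape false l = false) :
    fCore l = (if l.length = 0 then 0 else goB l 0 0) := by
  by_cases h0 : l.length = 0
  · have hnil : l = [] := List.length_eq_zero_iff.mp h0
    subst hnil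
    rw [fCore_nil]
    rfl
  · rw [if_neg h0]
    have hG := (stage2 l l.length).1 0 0 (by omega) (by rw [List.drop_zero]; exact hr)
    rw [List.drop_zero] at hG
    have hA := (stage1 l.length).1 l (le_refl _) hr
    rw [hA, hG]
    ring

-- ===== VERDICT (by name: the statement is the Claim_ definition above) =====
theorem f_spec : Claim_equal_f := by
  intro way _ hpre
  unfold Pre_f at hpre
  unfold Spec_f f f_alt
  exact main_list way.toList hpre
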